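-- pv_equiv track=rewrite | github.com/flext-sh/flext-ldap | src/ldap_core_shared/utilities/dn.py | escape_dn_value
-- ===== SOURCE A (Python) =====
-- from enum import Enum
--
-- class DNEscapeMode(Enum):
--     """DN escaping modes."""
--
--     RFC4514 = "rfc4514"        # Standard RFC 4514 escaping
--     MINIMAL = "minimal"        # Minimal escaping (only required chars)
--     FULL = "full"             # Full escaping (all special chars)
--
-- def escape_dn_value(value: str, escape_mode: DNEscapeMode = DNEscapeMode.RFC4514) -> str:
--     """Escape DN attribute value.
--
--     Args:
--         value: Attribute value to escape
--         escape_mode: Escaping mode to use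
--
--     Returns:
--         Escaped attribute value
--     """
--     if not value:
--         return value
--
--     # Characters that must be escaped according to RFC 4514
--     special_chars = {",", "=", "+", "<", ">", "#", ";", "\\", '"'}
--
--     # Leading and trailing spaces must be escaped
--     escaped = ""
--
--     # Escape leading spaces
--     i = 0
--     while i < len(value) and value[i] == " ":
--         escaped += "\\ "
--         i += 1
--
--     # Escape middle characters
--     while i < len(value):
--         char = value[i]
--
--         # Check for trailing spaces
--         if char == " ":
--             # Count trailing spaces
--             j = i
--             while j < len(value) and value[j] == " ":
--                 j += 1
--
--             if j == len(value):
--                 # These are trailing spaces - escape them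
--                 while i < j:
--                     escaped += "\\ "
--                     i += 1
--             else:
--                 # Not trailing spaces - don't escape
--                 escaped += char
--                 i += 1
--         elif char in special_chars:
--             # Escape special characters
--             escaped += "\\" + char
--             i += 1
--         elif ord(char) < 32 or ord(char) > 126:
--             # Escape non-printable characters as hex
--             escaped += f"\\{ord(char):02X}"
--             i += 1
--         else:
--             # Regular character
--             escaped += char
--             i += 1
--
--     return escaped
-- ===== SOURCE B (Python) =====
-- from enum import Enum
--
-- class DNEscapeMode(Enum):
--     """DN escaping modes."""
--
--     RFC4514 = "rfc4514"
--     MINIMAL = "minimal"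
--     FULL = "full"
--
-- _SPECIALS = ',=+<>#;\\"'
--
-- def _esc(c):
--     if c in _SPECIALS:
--         return "\\" + c
--     o = ord(c)
--     if o < 32 or o > 126:
--         return f"\\{o:02X}"
--     return c
--
-- def escape_dn_value(value: str, escape_mode: DNEscapeMode = DNEscapeMode.RFC4514) -> str:
--     if not value:
--         return value
--     lead = len(value) - len(value.lstrip(" "))
--     if lead == len(value):
--         return "\\ " * lead
--     trail = len(value) - len(value.rstrip(" "))
--     core = value[lead:len(value) - trail]
--     return "\\ " * lead + "".join(_esc(c) for c in core) + "\\ " * trail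
-- ===== Notes on version B (the rewrite author's own statement) =====
-- stated objective: simpler
-- what changed: Replaces A's single-cursor loop (which re-scans ahead at every space to decide whether the run is trailing) by computing the leading/trailing space runs once via lstrip/rstrip and mapping a pure per-character escape over the interior slice, joined in one expression.
import Mathlib
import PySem

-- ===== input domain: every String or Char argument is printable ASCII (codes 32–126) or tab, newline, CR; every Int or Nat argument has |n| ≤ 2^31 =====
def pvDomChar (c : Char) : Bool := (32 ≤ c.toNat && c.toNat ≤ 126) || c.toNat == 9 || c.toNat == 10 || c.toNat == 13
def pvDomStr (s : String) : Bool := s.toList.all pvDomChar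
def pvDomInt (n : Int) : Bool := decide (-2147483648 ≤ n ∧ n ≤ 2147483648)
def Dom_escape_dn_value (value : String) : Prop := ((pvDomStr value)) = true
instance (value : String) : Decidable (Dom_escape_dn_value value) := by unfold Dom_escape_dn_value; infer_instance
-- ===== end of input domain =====

-- B: compute the leading/trailing space runs once with lstrip/rstrip and map a pure
-- per-character escape over the interior slice, instead of A's single cursor loop that
-- re-scans ahead at every space to see whether it is trailing (objective: simpler).


-- ===== PORT A =====
-- RFC 4514 special characters (shared constant of both Pythons)
def pvSpecials : List Char := [',', '=', '+', '<', '>', '#', ';', '\\', '"']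

def pvHexDigit (n : Nat) : Char := if n < 10 then Char.ofNat (48 + n) else Char.ofNat (55 + n)

-- f"\{ord(c):02X}": two uppercase hex digits; exact for code points < 256 (Dom's are ≤ 126)
def pvHex2 (n : Nat) : List Char := [pvHexDigit (n / 16), pvHexDigit (n % 16)]

-- A's middle `while i < len(value)` loop; the remaining suffix plays the role of index i,
-- and `rest.all (· == ' ')` is the inner `while j < len(value)` trailing-space scan.
def pvMidA : List Char → List Char
  | [] => []
  | c :: rest =>
    if c = ' ' then
      if rest.all (· == ' ') then (List.replicate (rest.length + 1) ['\\', ' ']).flatten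
      else ' ' :: pvMidA rest
    else if c ∈ pvSpecials then '\\' :: c :: pvMidA rest
    else if c.toNat < 32 ∨ 126 < c.toNat then ('\\' :: pvHex2 c.toNat) ++ pvMidA rest
    else c :: pvMidA rest

def escape_dn_value (value : String) : String :=
  let l := value.toList
  if l = [] then value
  else
    -- the leading `while … value[i] == ' '` loop: one "\ " per leading space
    let lead := (l.takeWhile (· == ' ')).length
    String.mk ((List.replicate lead ['\\', ' ']).flatten ++ pvMidA (l.dropWhile (· == ' ')))

-- ===== PORT B =====
-- B's per-character escape `_esc`
def pvEscChar (c : Char) : List Char :=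
  if c ∈ pvSpecials then ['\\', c]
  else if c.toNat < 32 ∨ 126 < c.toNat then '\\' :: pvHex2 c.toNat
  else [c]

def escape_dn_value_alt (value : String) : String :=
  let l := value.toList
  if l = [] then value
  else
    -- lead = len(value) - len(value.lstrip(' ')): length of the run of leading spaces
    let lead := (l.takeWhile (· == ' ')).length
    if lead = l.length then String.mk (PySem.List.pyRepeat ['\\', ' '] (lead : Int))
    else
      -- trail = len(value) - len(value.rstrip(' ')): length of the run of trailing spaces
      let trail := (l.reverse.takeWhile (· == ' ')).length
      let core := PySem.List.slice l (some (lead : Int)) (some ((l.length - trail : Nat) : Int))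
      String.mk (PySem.List.pyRepeat ['\\', ' '] (lead : Int)
        ++ core.flatMap pvEscChar ++ PySem.List.pyRepeat ['\\', ' '] (trail : Int))

-- ===== PRECONDITION & SPEC =====
def Spec_escape_dn_value (value : String) (out : String) : Prop := out = escape_dn_value_alt value
instance (value : String) (out : String) : Decidable (Spec_escape_dn_value value out) := by unfold Spec_escape_dn_value; infer_instance

-- ===== CLAIM (what is proved, stated in full; the proofs are below) =====
def Claim_equal_escape_dn_value : Prop := ∀ (value : String), Dom_escape_dn_value value → Spec_escape_dn_value value (escape_dn_value value)

-- ===== LEMMAS AND PROOFS =====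

-- length of the trailing-space run
def pvTrail (l : List Char) : Nat := (l.reverse.takeWhile (· == ' ')).length

theorem pvTrail_le (l : List Char) : pvTrail l ≤ l.length := by
  have := (List.takeWhile_sublist (p := (· == ' ')) (l := l.reverse)).length_le
  simpa [pvTrail] using this

theorem pvTrail_cons_all (c : Char) (rest : List Char) (hc : c = ' ')
    (h : rest.all (· == ' ') = true) : pvTrail (c :: rest) = rest.length + 1 := by
  have hmem : ∀ x ∈ (c :: rest).reverse, (x == ' ') = true := by
    intro x hx
    rw [List.mem_reverse] at hx
    rcases List.mem_cons.mp hx with h1 | h1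
    · simp [h1, hc]
    · exact List.all_eq_true.mp h x h1
  have ht : (c :: rest).reverse.takeWhile (· == ' ') = (c :: rest).reverse :=
    List.takeWhile_eq_self_iff.mpr hmem
  unfold pvTrail
  rw [ht]
  simp

theorem pvTrail_cons_not_all (c : Char) (rest : List Char)
    (h : ¬ (c = ' ' ∧ rest.all (· == ' ') = true)) : pvTrail (c :: rest) = pvTrail rest := by
  unfold pvTrail
  rw [List.reverse_cons, List.takeWhile_append]
  by_cases hcond : (rest.reverse.takeWhile (· == ' ')).length = rest.reverse.length
  · have hrt : rest.reverse.takeWhile (· == ' ') = rest.reverse :=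
      (List.takeWhile_sublist _).eq_of_length hcond
    have hall : ∀ x ∈ rest, (x == ' ') = true := fun x hx =>
      List.takeWhile_eq_self_iff.mp hrt x (List.mem_reverse.mpr hx)
    have hc : ¬ c = ' ' := fun hcc => h ⟨hcc, List.all_eq_true.mpr hall⟩
    have hcb : (c == ' ') = false := by simpa using hc
    rw [if_pos hcond]
    simp [hcb, hrt]
  · rw [if_neg hcond]

-- the core of A's loop: it equals "escape each non-trailing char, then the trailing run"
theorem pvMidA_eq (l : List Char) :
    pvMidA l = (l.take (l.length - pvTrail l)).flatMap pvEscChar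
      ++ (List.replicate (pvTrail l) ['\\', ' ']).flatten := by
  induction l with
  | nil => simp [pvMidA, pvTrail]
  | cons c rest ih =>
    by_cases hca : c = ' ' ∧ rest.all (· == ' ') = true
    · obtain ⟨hc, hall⟩ := hca
      subst hc
      have ht := pvTrail_cons_all ' ' rest rfl hall
      simp [pvMidA, hall, ht]
    · have ht := pvTrail_cons_not_all c rest hca
      have hle := pvTrail_le rest
      have hcore : (c :: rest).take ((c :: rest).length - pvTrail (c :: rest))
          = c :: rest.take (rest.length - pvTrail rest) := by
        rw [ht]
        have hs : rest.length + 1 - pvTrail rest = (rest.length - pvTrail rest) + 1 := by omega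
        simp [hs]
      rw [hcore, ht]
      by_cases hc : c = ' '
      · have hall : ¬ rest.all (· == ' ') = true := fun hx => hca ⟨hc, hx⟩
        have hesc : pvEscChar ' ' = [' '] := by decide
        simp [pvMidA, hc, hall, hesc, ih]
      · by_cases hs : c ∈ pvSpecials
        · have hesc : pvEscChar c = ['\\', c] := by simp [pvEscChar, hs]
          simp [pvMidA, hc, hs, hesc, ih]
        · by_cases hh : c.toNat < 32 ∨ 126 < c.toNat
          · have hesc : pvEscChar c = '\\' :: pvHex2 c.toNat := by
              simp [pvEscChar, hs, hh]
            simp [pvMidA, hc, hs, hh, hesc, ih]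
          · have hesc : pvEscChar c = [c] := by simp [pvEscChar, hs, hh]
            simp [pvMidA, hc, hs, hh, hesc, ih]

theorem pvDrop_takeWhile_length (p : Char → Bool) (l : List Char) :
    l.drop (l.takeWhile p).length = l.dropWhile p := by
  induction l with
  | nil => simp
  | cons a t ih =>
    by_cases ha : p a
    · simp [ha, ih]
    · simp [ha]

-- ===== VERDICT (by name: the statement is the Claim_ definition above) =====
theorem escape_dn_value_spec : Claim_equal_escape_dn_value := by
  unfold Claim_equal_escape_dn_value Spec_escape_dn_value
  intro value _
  unfold escape_dn_value escape_dn_value_alt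
  set l := value.toList with hl
  by_cases hnil : l = []
  · simp [hnil]
  · simp only [hnil, if_false]
    set lead := (l.takeWhile (· == ' ')).length with hlead
    by_cases hall : lead = l.length
    · -- all spaces: A's dropWhile is empty
      have htw : l.takeWhile (· == ' ') = l :=
        (List.takeWhile_sublist _).eq_of_length hall
      have hdw : l.dropWhile (· == ' ') = [] := by
        have h := List.takeWhile_append_dropWhile (p := (· == ' ')) (l := l)
        rw [htw] at h
        simpa using h.symm
      simp [hall, hdw, pvMidA, PySem.List.pyRepeat]
    · simp only [hall, if_false]
      set m := l.dropWhile (· == ' ') with hm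
      have hsplit : l.takeWhile (· == ' ') ++ m = l := List.takeWhile_append_dropWhile
      have hlen : lead + m.length = l.length := by
        have h := congrArg List.length hsplit
        simpa [hlead] using h
      have hmne : m ≠ [] := by
        intro h
        rw [h] at hlen
        exact hall (by simpa using hlen)
      have hmhead : ¬ (m.head hmne) = ' ' := by
        have := List.head_dropWhile_not (p := (· == ' ')) (l := l) (by simpa [hm] using hmne)
        simpa [hm] using this
      have hmnall : m.reverse.all (· == ' ') = false := by
        rcases List.exists_cons_of_ne_nil hmne with ⟨a, t, hat⟩
        have ha : ¬ a = ' ' := by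
          have h2 : m.head hmne = a := by simp [hat]
          rw [h2] at hmhead; exact hmhead
        simp only [List.all_eq_false]
        exact ⟨a, by simp [hat], by simpa using ha⟩
      have hcond : ¬ (m.reverse.takeWhile (· == ' ')).length = m.reverse.length := by
        intro hx
        have hrt : m.reverse.takeWhile (· == ' ') = m.reverse :=
          (List.takeWhile_sublist _).eq_of_length hx
        have hall2 : ∀ x ∈ m.reverse, (x == ' ') = true := List.takeWhile_eq_self_iff.mp hrt
        rw [List.all_eq_false] at hmnall
        obtain ⟨x, hx1, hx2⟩ := hmnall
        exact hx2 (hall2 x hx1)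
      have htrail : pvTrail l = pvTrail m := by
        unfold pvTrail
        conv_lhs => rw [show l = List.takeWhile (· == ' ') l ++ m from hsplit.symm]
        rw [List.reverse_append, List.takeWhile_append, if_neg hcond]
      have hdrop : l.drop lead = m := pvDrop_takeWhile_length _ l
      have hslice : PySem.List.slice l (some (lead : Int)) (some ((l.length - pvTrail l : Nat) : Int))
          = m.take (m.length - pvTrail m) := by
        rw [PySem.List.slice_natCast, hdrop, htrail]
        congr 1
        omega
      have hfold : (List.takeWhile (fun x => x == ' ') l.reverse).length = pvTrail l := rfl
      rw [pvMidA_eq m, hfold, hslice, htrail]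
      simp [PySem.List.pyRepeat]
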